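-- pv_equiv track=rewrite | github.com/jasonwong2460/large_prime_numbers_test | algorithms/aks.py | polynomial_test
-- ===== SOURCE A (Python) =====
-- def polynomial_test(n, a, r):
--     """
--     核心多项式测试：
--     检查 (x + a)^n ≡ x^n + a (mod x^r - 1, n)
--     """
--     # 计算 (x + a)^n mod (x^r - 1) 的系数（模n）
--     poly = [0] * r
--     poly[0] = 1  # 初始多项式为1
--
--     # 使用快速幂计算 (x + a)^n
--     exponent = n
--     base = [0] * r
--     base[0] = a  # x + a 的表示：[a, 1, 0, 0, ...]
--     base[1] = 1
--
--     while exponent > 0: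
--         if exponent & 1:
--             poly = poly_multiply(poly, base, r, n)
--         base = poly_multiply(base, base, r, n)
--         exponent >>= 1
--
--     # 检查是否等于 x^n + a
--     # x^n mod (x^r - 1) 相当于 x^(n mod r)
--     poly_expected = [0] * r
--     poly_expected[0] = a % n
--     poly_expected[n % r] = (poly_expected[n % r] + 1) % n
--
--     # 比较系数
--     return poly == poly_expected
--
-- def poly_multiply(p, q, r, mod):
--     """
--     多项式乘法模 (x^r - 1) 和模 mod
--     返回：p * q mod (x^r - 1) 的系数列表（长度为r）
--     """
--     result = [0] * r
--
--     for i in range(r):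
--         if p[i] == 0:
--             continue
--         for j in range(r):
--             if q[j] == 0:
--                 continue
--             # 注意指数取模r
--             idx = (i + j) % r
--             result[idx] = (result[idx] + p[i] * q[j]) % mod
--
--     return result
-- ===== SOURCE B (Python) =====
-- def polynomial_test(n, a, r):
--     """AKS congruence test (x+a)^n ≡ x^n + a (mod x^r - 1, n); the cyclic
--     polynomial product is computed by Karatsuba multiplication of the full
--     product followed by a wrap-around fold, instead of a schoolbook O(r^2)
--     cyclic convolution."""
--     poly = [1] + [0] * (r - 1)
--     base = [a, 1] + [0] * (r - 2)
--     e = n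
--     while e > 0:
--         if e & 1:
--             poly = _cyc_mul(poly, base, r, n)
--         base = _cyc_mul(base, base, r, n)
--         e >>= 1
--     expected = [((a if k == 0 else 0) + (1 if k == n % r else 0)) % n
--                 for k in range(r)]
--     return poly == expected
--
--
-- def _add(p, q):
--     m = max(len(p), len(q))
--     return [(p[k] if k < len(p) else 0) + (q[k] if k < len(q) else 0)
--             for k in range(m)]
--
--
-- def _sub(p, q):
--     m = max(len(p), len(q))
--     return [(p[k] if k < len(p) else 0) - (q[k] if k < len(q) else 0)
--             for k in range(m)]
--
--
-- def _school(p, q):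
--     # plain product for tiny factors (the Karatsuba base case)
--     if not p:
--         return []
--     return _add([p[0] * c for c in q], [0] + _school(p[1:], q))
--
--
-- def _kara(p, q):
--     # full product p * q by Karatsuba splitting
--     if len(p) > len(q):
--         p, q = q, p
--     if len(p) <= 32:
--         return _school(p, q)
--     m = len(p) // 2
--     p0, p1 = p[:m], p[m:]
--     q0, q1 = q[:m], q[m:]
--     lo = _kara(p0, q0)
--     hi = _kara(p1, q1)
--     mid = _sub(_sub(_kara(_add(p0, p1), _add(q0, q1)), lo), hi)
--     return _add(_add(lo, [0] * m + mid), [0] * (2 * m) + hi)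
--
--
-- def _trim(p):
--     # drop trailing zero coefficients (work with the actual degree)
--     k = len(p)
--     while k > 0 and p[k - 1] == 0:
--         k -= 1
--     return p[:k]
--
--
-- def _cyc_mul(p, q, r, n):
--     # p * q mod (x^r - 1, n)
--     full = _kara(_trim(p), _trim(q))
--     out = [0] * r
--     for j, c in enumerate(full):
--         out[j % r] += c
--     return [c % n for c in out]
-- ===== Notes on version B (the rewrite author's own statement) =====
-- stated objective: alternative
-- what changed: The cyclic product mod (x^r-1, n) is computed by trimming trailing zeros and taking a Karatsuba divide-and-conquer full multiplication followed by a wrap-around fold with one mod-n reduction per coefficient, replacing A's schoolbook double-loop cyclic convolution with incremental mod; the expected polynomial is built by comprehension.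
import Mathlib
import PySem

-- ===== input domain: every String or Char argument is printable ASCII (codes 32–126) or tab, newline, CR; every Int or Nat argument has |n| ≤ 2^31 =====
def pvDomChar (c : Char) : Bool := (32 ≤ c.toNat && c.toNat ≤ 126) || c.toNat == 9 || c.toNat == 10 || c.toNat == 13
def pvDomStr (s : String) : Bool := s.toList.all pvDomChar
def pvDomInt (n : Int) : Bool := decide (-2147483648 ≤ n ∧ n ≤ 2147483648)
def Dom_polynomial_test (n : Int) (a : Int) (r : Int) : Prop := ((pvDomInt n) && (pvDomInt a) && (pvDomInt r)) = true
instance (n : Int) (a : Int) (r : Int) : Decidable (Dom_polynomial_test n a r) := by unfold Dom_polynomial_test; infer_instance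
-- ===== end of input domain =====

-- B replaces A's schoolbook double-loop cyclic convolution by a genuinely different
-- multiplication algorithm: trim trailing zeros, Karatsuba divide-and-conquer full
-- product, then a wrap-around fold with one mod-n reduction per coefficient
-- (objective: alternative algorithm; the square-and-multiply skeleton is shared).

-- ===== PORT A =====
-- body of poly_multiply's inner j-loop (helper of the literal port of A)
def pvA_step (p q : List Int) (r m i : Int) (result : List Int) (j : Int) : List Int :=
  if PySem.List.pyGetD q j 0 = 0 then result
  else PySem.List.pySetD result (PySem.Int.mod (i + j) r)
        (PySem.Int.mod (PySem.List.pyGetD result (PySem.Int.mod (i + j) r) 0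
          + PySem.List.pyGetD p i 0 * PySem.List.pyGetD q j 0) m)

-- poly_multiply(p, q, r, mod)
def pvA_mul (p q : List Int) (r m : Int) : List Int :=
  (PySem.List.pyRange 0 r 1).foldl (fun result i =>
    if PySem.List.pyGetD p i 0 = 0 then result
    else (PySem.List.pyRange 0 r 1).foldl (pvA_step p q r m i) result)
    (List.replicate r.toNat 0)

-- A's 'while exponent > 0' loop (returns the final poly); the Nat fuel only makes the
-- recursion structural: fuel = e.toNat bounds the iteration count exactly (e halves
-- each round), so the port computes precisely what the while-loop computes
def pvA_loop : Nat → Int → List Int → List Int → Int → Int → List Int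
  | 0, _, poly, _, _, _ => poly
  | fuel + 1, e, poly, base, r, n =>
    if 0 < e then
      pvA_loop fuel (e >>> (1 : Nat))
        (if PySem.Int.band e 1 ≠ 0 then pvA_mul poly base r n else poly)
        (pvA_mul base base r n) r n
    else poly

def polynomial_test (n : Int) (a : Int) (r : Int) : Bool :=
  let poly0 := PySem.List.pySetD (List.replicate r.toNat 0) 0 1
  let base0 := PySem.List.pySetD (PySem.List.pySetD (List.replicate r.toNat 0) 0 a) 1 1
  let poly := pvA_loop n.toNat n poly0 base0 r n
  let pe0 := PySem.List.pySetD (List.replicate r.toNat 0) 0 (PySem.Int.mod a n)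
  let pe := PySem.List.pySetD pe0 (PySem.Int.mod n r)
              (PySem.Int.mod (PySem.List.pyGetD pe0 (PySem.Int.mod n r) 0 + 1) n)
  poly == pe

-- ===== PORT B =====
-- _add(p, q): coefficientwise sum, padded to the longer length
def pvB_add (p q : List Int) : List Int :=
  (List.range (max p.length q.length)).map (fun k => p.getD k 0 + q.getD k 0)

-- _sub(p, q)
def pvB_sub (p q : List Int) : List Int :=
  (List.range (max p.length q.length)).map (fun k => p.getD k 0 - q.getD k 0)

-- _school(p, q): plain product for tiny factors (Karatsuba base case)
def pvB_school : List Int → List Int → List Int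
  | [], _ => []
  | c :: p', q => pvB_add (q.map (fun x => c * x)) (0 :: pvB_school p' q)

-- _kara(p, q): full product by Karatsuba splitting; the Nat fuel only makes the
-- recursion structural: fuel > |p| + |q| always suffices (each recursive call's
-- total length strictly decreases), so the port computes exactly Source B's _kara
def pvB_kara : Nat → List Int → List Int → List Int
  | 0, _, _ => []
  | fuel + 1, p0, q0 =>
    let p := if q0.length < p0.length then q0 else p0
    let q := if q0.length < p0.length then p0 else q0
    if p.length ≤ 32 then pvB_school p q
    else
      let m := p.length / 2
      let lo := pvB_kara fuel (p.take m) (q.take m)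
      let hi := pvB_kara fuel (p.drop m) (q.drop m)
      let mid := pvB_sub (pvB_sub (pvB_kara fuel (pvB_add (p.take m) (p.drop m))
                                            (pvB_add (q.take m) (q.drop m))) lo) hi
      pvB_add (pvB_add lo (List.replicate m 0 ++ mid)) (List.replicate (2 * m) 0 ++ hi)

-- _trim(p): drop trailing zero coefficients; the while-loop on k is the structural
-- recursion pvB_trimlen on k, and p[:k] is List.take (k ≥ 0, exact)
def pvB_trimlen (p : List Int) : Nat → Nat
  | 0 => 0
  | k + 1 => if p.getD k 0 == 0 then pvB_trimlen p k else k + 1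

def pvB_trim (p : List Int) : List Int :=
  p.take (pvB_trimlen p p.length)

-- body of the 'for j, c in enumerate(full)' wrap-around loop
def pvB_cycstep (r : Int) (out : List Int) (jc : Int × Int) : List Int :=
  PySem.List.pySetD out (PySem.Int.mod jc.1 r)
    (PySem.List.pyGetD out (PySem.Int.mod jc.1 r) 0 + jc.2)

-- _cyc_mul(p, q, r, n): Karatsuba full product, wrap-around fold, reduce mod n
def pvB_cyc (p q : List Int) (r n : Int) : List Int :=
  ((PySem.List.enumerate
      (pvB_kara ((pvB_trim p).length + (pvB_trim q).length + 1) (pvB_trim p) (pvB_trim q)) 0).foldl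
      (pvB_cycstep r)
      (List.replicate r.toNat 0)).map (fun c => PySem.Int.mod c n)

-- B's 'while e > 0' loop (same skeleton as A, Karatsuba-based multiply; same fuel device)
def pvB_loop : Nat → Int → List Int → List Int → Int → Int → List Int
  | 0, _, poly, _, _, _ => poly
  | fuel + 1, e, poly, base, r, n =>
    if 0 < e then
      pvB_loop fuel (e >>> (1 : Nat))
        (if PySem.Int.band e 1 ≠ 0 then pvB_cyc poly base r n else poly)
        (pvB_cyc base base r n) r n
    else poly

def polynomial_test_alt (n : Int) (a : Int) (r : Int) : Bool :=
  let poly := pvB_loop n.toNat n (1 :: List.replicate (r - 1).toNat 0)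
                (a :: 1 :: List.replicate (r - 2).toNat 0) r n
  let expected := (PySem.List.pyRange 0 r 1).map (fun k =>
    PySem.Int.mod ((if k = 0 then a else 0) + (if k = PySem.Int.mod n r then 1 else 0)) n)
  poly == expected

-- ===== PRECONDITION & SPEC =====
-- A raises outside Pre_: IndexError for r < 2 (poly[0] / base[1] on a too-short list),
-- ZeroDivisionError for n = 0 (a % n); Pre_ excludes exactly the raising inputs.
def Pre_polynomial_test (n : Int) (a : Int) (r : Int) : Prop := 2 ≤ r ∧ n ≠ 0
instance (n : Int) (a : Int) (r : Int) : Decidable (Pre_polynomial_test n a r) := by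
  unfold Pre_polynomial_test; infer_instance

def pvWitness_polynomial_test : Int × Int × Int := (5, 2, 3)

def Spec_polynomial_test (n : Int) (a : Int) (r : Int) (out : Bool) : Prop := out = polynomial_test_alt n a r
instance (n : Int) (a : Int) (r : Int) (out : Bool) : Decidable (Spec_polynomial_test n a r out) := by unfold Spec_polynomial_test; infer_instance

-- ===== CLAIM (what is proved, stated in full; the proofs are below) =====
def Claim_equal_polynomial_test : Prop := ∀ (n : Int) (a : Int) (r : Int), Dom_polynomial_test n a r → Pre_polynomial_test n a r → Spec_polynomial_test n a r (polynomial_test n a r)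

-- ===== LEMMAS AND PROOFS =====

theorem pvB_add_length (p q : List Int) : (pvB_add p q).length = max p.length q.length := by
  simp [pvB_add]

theorem pvB_sub_length (p q : List Int) : (pvB_sub p q).length = max p.length q.length := by
  simp [pvB_sub]

-- ---- Python floor-mod toolkit ----
theorem pvMod_dvd_sub (m x : Int) : m ∣ PySem.Int.mod x m - x := by
  have h := PySem.Int.floordiv_mul_add_mod x m
  exact ⟨-(PySem.Int.floordiv x m), by linarith [h]⟩

theorem pvMod_congr {m x y : Int} (hm : m ≠ 0) (h : m ∣ x - y) :
    PySem.Int.mod x m = PySem.Int.mod y m := by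
  have hx := pvMod_dvd_sub m x
  have hy := pvMod_dvd_sub m y
  have hd : m ∣ PySem.Int.mod x m - PySem.Int.mod y m := by
    have he : PySem.Int.mod x m - PySem.Int.mod y m
        = (PySem.Int.mod x m - x) - (PySem.Int.mod y m - y) + (x - y) := by ring
    rw [he]
    exact dvd_add (dvd_sub hx hy) h
  rcases lt_trichotomy m 0 with hm' | hm' | hm'
  · have bx := PySem.Int.mod_neg_bounds x hm'
    have by' := PySem.Int.mod_neg_bounds y hm'
    have := Int.eq_zero_of_dvd_of_natAbs_lt_natAbs hd (by omega)
    omega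
  · exact absurd hm' hm
  · have bx1 := PySem.Int.mod_nonneg x hm'
    have bx2 := PySem.Int.mod_lt x hm'
    have by1 := PySem.Int.mod_nonneg y hm'
    have by2 := PySem.Int.mod_lt y hm'
    have := Int.eq_zero_of_dvd_of_natAbs_lt_natAbs hd (by omega)
    omega

theorem pvMod_mod_add {m : Int} (hm : m ≠ 0) (x b : Int) :
    PySem.Int.mod (PySem.Int.mod x m + b) m = PySem.Int.mod (x + b) m := by
  refine pvMod_congr hm ?_
  have he : PySem.Int.mod x m + b - (x + b) = PySem.Int.mod x m - x := by ring
  rw [he]; exact pvMod_dvd_sub m x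

theorem pvMod_zero {m : Int} (hm : m ≠ 0) : PySem.Int.mod 0 m = 0 := by
  have hd : m ∣ PySem.Int.mod 0 m - 0 := by simpa using pvMod_dvd_sub m 0
  rcases lt_trichotomy m 0 with hm' | hm' | hm'
  · have b := PySem.Int.mod_neg_bounds 0 hm'
    have := Int.eq_zero_of_dvd_of_natAbs_lt_natAbs hd (by omega)
    omega
  · exact absurd hm' hm
  · have b1 := PySem.Int.mod_nonneg 0 hm'
    have b2 := PySem.Int.mod_lt 0 hm'
    have := Int.eq_zero_of_dvd_of_natAbs_lt_natAbs hd (by omega)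
    omega

theorem pvMod_self_of_range {r x : Int} (hx : 0 ≤ x) (hx' : x < r) :
    PySem.Int.mod x r = x := by
  have hr : 0 < r := by omega
  have hd : r ∣ PySem.Int.mod x r - x := pvMod_dvd_sub r x
  have b1 := PySem.Int.mod_nonneg x hr
  have b2 := PySem.Int.mod_lt x hr
  have := Int.eq_zero_of_dvd_of_natAbs_lt_natAbs hd (by omega)
  omega

theorem pvMod_idem {m : Int} (hm : m ≠ 0) (x : Int) :
    PySem.Int.mod (PySem.Int.mod x m) m = PySem.Int.mod x m := by
  have h := pvMod_mod_add hm x 0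
  simpa using h

theorem pvEq_of_mod_range {r x y : Int} (hx : 0 ≤ x) (hx' : x < r) (hy : 0 ≤ y)
    (hy' : y < r) (h : r ∣ x - y) : x = y := by
  have := Int.eq_zero_of_dvd_of_natAbs_lt_natAbs h (by omega)
  omega

-- ---- A's poly_multiply characterised: coefficient k is (Σ_i p[i]·q[(k−i) mod r]) mod m ----
-- pvS p q r i k: the convolution term p[i] * q[(k - i) % r]
def pvS (p q : List Int) (r i k : Int) : Int :=
  PySem.List.pyGetD p i 0 * PySem.List.pyGetD q (PySem.Int.mod (k - i) r) 0

theorem pv_inner_fold (p q : List Int) (r m i : Int) (hr : 0 < r)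
    (res : List Int) (hlen : res.length = r.toNat)
    (hred : ∀ k : Nat, k < r.toNat →
      PySem.Int.mod (PySem.List.pyGetD res (k : Int) 0) m = PySem.List.pyGetD res (k : Int) 0) :
    ∀ J : Nat, (J : Int) ≤ r →
      ((PySem.List.pyRange 0 (J : Int) 1).foldl (pvA_step p q r m i) res).length = r.toNat ∧
      ∀ k : Nat, k < r.toNat →
        PySem.List.pyGetD ((PySem.List.pyRange 0 (J : Int) 1).foldl (pvA_step p q r m i) res) (k : Int) 0 =
          if PySem.Int.mod ((k : Int) - i) r < (J : Int)
          then PySem.Int.mod (PySem.List.pyGetD res (k : Int) 0 + pvS p q r i (k : Int)) m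
          else PySem.List.pyGetD res (k : Int) 0 := by
  intro J
  induction J with
  | zero =>
    intro _
    rw [PySem.List.pyRange_one_eq_nil (by norm_num)]
    refine ⟨hlen, ?_⟩
    intro k hk
    rw [List.foldl_nil, if_neg (by have := PySem.Int.mod_nonneg ((k:Int) - i) hr; omega)]
  | succ J ih =>
    intro hJ
    have hJr : (J : Int) < r := by push_cast at hJ ⊢; omega
    obtain ⟨ihlen, ihval⟩ := ih (by omega)
    have hsplit : PySem.List.pyRange 0 ((J + 1 : Nat) : Int) 1
        = PySem.List.pyRange 0 (J : Int) 1 ++ [(J : Int)] := by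
      push_cast
      exact PySem.List.pyRange_one_succ_right (by positivity)
    rw [hsplit, List.foldl_append, List.foldl_cons, List.foldl_nil]
    set resJ := (PySem.List.pyRange 0 (J : Int) 1).foldl (pvA_step p q r m i) res with hresJ
    have hidx0 : 0 ≤ PySem.Int.mod (i + (J : Int)) r := PySem.Int.mod_nonneg _ hr
    have hidx1 : PySem.Int.mod (i + (J : Int)) r < r := PySem.Int.mod_lt _ hr
    set idx := PySem.Int.mod (i + (J : Int)) r with hidxdef
    have hidxlen : idx.toNat < r.toNat := by omega
    have hidxcast : ((idx.toNat : Nat) : Int) = idx := Int.toNat_of_nonneg hidx0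
    -- the unique k hit by step J
    have hj0idx : PySem.Int.mod (((idx.toNat : Nat) : Int) - i) r = (J : Int) := by
      rw [hidxcast]
      have h1 : r ∣ (idx - i) - (J : Int) := by
        have := pvMod_dvd_sub r (i + (J : Int))
        rw [← hidxdef] at this
        have he : idx - i - (J : Int) = idx - (i + (J : Int)) := by ring
        rw [he]
        exact this
      calc PySem.Int.mod (idx - i) r = PySem.Int.mod (J : Int) r :=
            pvMod_congr (by omega) h1
        _ = (J : Int) := pvMod_self_of_range (by positivity) hJr
    have huniq : ∀ k : Nat, k < r.toNat →
        PySem.Int.mod ((k : Int) - i) r = (J : Int) → k = idx.toNat := by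
      intro k hk hmod
      have h1 : r ∣ (J : Int) - ((k : Int) - i) := by
        have := pvMod_dvd_sub r ((k : Int) - i)
        rw [hmod] at this
        exact this
      have h2 : r ∣ (idx - i) - (J : Int) := by
        have := pvMod_dvd_sub r (i + (J : Int))
        rw [← hidxdef] at this
        have he : idx - i - (J : Int) = idx - (i + (J : Int)) := by ring
        rw [he]
        exact this
      have h3 : r ∣ idx - (k : Int) := by
        have he : idx - (k : Int) = ((idx - i) - (J : Int)) + ((J : Int) - ((k : Int) - i)) := by ring
        rw [he]
        exact dvd_add h2 h1
      have := pvEq_of_mod_range hidx0 hidx1 (by positivity) (by omega : (k:Int) < r) h3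
      omega
    rw [pvA_step]
    by_cases hq : PySem.List.pyGetD q (J : Int) 0 = 0
    · rw [if_pos hq]
      refine ⟨ihlen, ?_⟩
      intro k hk
      rw [ihval k hk]
      by_cases hlt : PySem.Int.mod ((k : Int) - i) r < (J : Int)
      · rw [if_pos hlt, if_pos (by push_cast; omega)]
      · by_cases heq : PySem.Int.mod ((k : Int) - i) r = (J : Int)
        · rw [if_neg hlt, if_pos (by push_cast; omega)]
          rw [pvS, heq, hq, mul_zero, add_zero, hred k hk]
        · rw [if_neg hlt, if_neg (by push_cast; omega)]
    · rw [if_neg hq]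
      refine ⟨by rw [PySem.List.length_pySetD]; exact ihlen, ?_⟩
      intro k hk
      rw [← hidxdef, ← hidxcast, PySem.List.pyGetD_pySetD_natCast resJ idx.toNat k _ 0 (by omega)]
      by_cases hkidx : k = idx.toNat
      · rw [if_pos hkidx]
        have hval_idx : PySem.List.pyGetD resJ ((idx.toNat : Nat) : Int) 0
            = PySem.List.pyGetD res ((idx.toNat : Nat) : Int) 0 := by
          rw [ihval idx.toNat hidxlen, if_neg (by rw [hj0idx]; omega)]
        subst hkidx
        rw [if_pos (by rw [hj0idx]; push_cast; omega)]
        rw [hidxcast, ← hidxcast, hval_idx]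
        rw [pvS, hj0idx]
      · rw [if_neg hkidx]
        rw [ihval k hk]
        have hne : PySem.Int.mod ((k : Int) - i) r ≠ (J : Int) := fun h => hkidx (huniq k hk h)
        by_cases hlt : PySem.Int.mod ((k : Int) - i) r < (J : Int)
        · rw [if_pos hlt, if_pos (by push_cast; omega)]
        · rw [if_neg hlt, if_neg (by push_cast; omega)]

theorem pv_outer_fold (p q : List Int) (r m : Int) (hr : 0 < r) (hm : m ≠ 0) :
    ∀ I : Nat,
      ((PySem.List.pyRange 0 (I : Int) 1).foldl (fun result i =>
          if PySem.List.pyGetD p i 0 = 0 then result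
          else (PySem.List.pyRange 0 r 1).foldl (pvA_step p q r m i) result)
        (List.replicate r.toNat 0)).length = r.toNat ∧
      ∀ k : Nat, k < r.toNat →
        PySem.List.pyGetD ((PySem.List.pyRange 0 (I : Int) 1).foldl (fun result i =>
          if PySem.List.pyGetD p i 0 = 0 then result
          else (PySem.List.pyRange 0 r 1).foldl (pvA_step p q r m i) result)
          (List.replicate r.toNat 0)) (k : Int) 0 =
        PySem.Int.mod (((PySem.List.pyRange 0 (I : Int) 1).map (fun i => pvS p q r i (k : Int))).sum) m := by
  intro I
  induction I with
  | zero =>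
    rw [show PySem.List.pyRange 0 ((0:Nat):Int) 1 = [] from PySem.List.pyRange_one_eq_nil (by norm_num)]
    refine ⟨by simp, ?_⟩
    intro k hk
    rw [List.foldl_nil, List.map_nil, List.sum_nil, pvMod_zero hm,
      PySem.List.pyGetD_natCast, List.getD_replicate _ hk]
  | succ I ih =>
    obtain ⟨ihlen, ihval⟩ := ih
    have hsplit : PySem.List.pyRange 0 ((I + 1 : Nat) : Int) 1
        = PySem.List.pyRange 0 (I : Int) 1 ++ [(I : Int)] := by
      push_cast
      exact PySem.List.pyRange_one_succ_right (by positivity)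
    rw [hsplit, List.foldl_append, List.foldl_cons, List.foldl_nil]
    set resI := (PySem.List.pyRange 0 (I : Int) 1).foldl (fun result i =>
          if PySem.List.pyGetD p i 0 = 0 then result
          else (PySem.List.pyRange 0 r 1).foldl (pvA_step p q r m i) result)
        (List.replicate r.toNat 0) with hresI
    by_cases hp : PySem.List.pyGetD p (I : Int) 0 = 0
    · rw [if_pos hp]
      refine ⟨ihlen, ?_⟩
      intro k hk
      rw [ihval k hk, List.map_append, List.map_cons, List.map_nil, List.sum_append]
      have hz : pvS p q r (I : Int) (k : Int) = 0 := by
        rw [pvS, hp, zero_mul]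
      rw [hz]
      simp
    · rw [if_neg hp]
      have hrcast : ((r.toNat : Nat) : Int) = r := Int.toNat_of_nonneg (le_of_lt hr)
      have hred : ∀ k : Nat, k < r.toNat →
          PySem.Int.mod (PySem.List.pyGetD resI (k : Int) 0) m = PySem.List.pyGetD resI (k : Int) 0 := by
        intro k hk
        rw [ihval k hk, pvMod_idem hm]
      have hin := pv_inner_fold p q r m (I : Int) hr resI ihlen hred r.toNat
        (by rw [hrcast])
      rw [hrcast] at hin
      obtain ⟨hlen', hval'⟩ := hin
      refine ⟨hlen', ?_⟩
      intro k hk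
      rw [hval' k hk, if_pos (by
        have h1 := PySem.Int.mod_lt ((k : Int) - (I : Int)) hr
        omega), ihval k hk, pvMod_mod_add hm, List.map_append, List.map_cons,
        List.map_nil, List.sum_append]
      simp

-- ---- coefficient-function view of B's polynomial arithmetic ----
-- pvF p: the coefficient function of the list p (0 beyond its length)
def pvF (p : List Int) : Nat → Int := fun k => p.getD k 0

-- shift by m (multiplication by x^m)
def pvSh (m : Nat) (f : Nat → Int) : Nat → Int := fun k => if k < m then 0 else f (k - m)

-- linear convolution (product of coefficient functions)
def pvConv (f g : Nat → Int) : Nat → Int := fun k => ∑ i ∈ Finset.range (k + 1), f i * g (k - i)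

theorem pvF_nil : pvF [] = 0 := by
  funext k; simp [pvF]

theorem pvF_add (p q : List Int) : pvF (pvB_add p q) = pvF p + pvF q := by
  funext k
  by_cases hk : k < max p.length q.length
  · simp [pvF, pvB_add, List.getD_eq_getElem, hk]
  · have h1 : p.length ≤ k := by omega
    have h2 : q.length ≤ k := by omega
    have h3 : (pvB_add p q).length ≤ k := by rw [pvB_add_length]; omega
    simp only [pvF, Pi.add_apply]
    rw [List.getD_eq_default _ _ h3, List.getD_eq_default _ _ h1, List.getD_eq_default _ _ h2]
    norm_num

theorem pvF_sub (p q : List Int) : pvF (pvB_sub p q) = pvF p - pvF q := by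
  funext k
  by_cases hk : k < max p.length q.length
  · simp [pvF, pvB_sub, List.getD_eq_getElem, hk]
  · have h1 : p.length ≤ k := by omega
    have h2 : q.length ≤ k := by omega
    have h3 : (pvB_sub p q).length ≤ k := by rw [pvB_sub_length]; omega
    simp only [pvF, Pi.sub_apply]
    rw [List.getD_eq_default _ _ h3, List.getD_eq_default _ _ h1, List.getD_eq_default _ _ h2]
    norm_num

theorem pvF_replicate_append (m : Nat) (l : List Int) :
    pvF (List.replicate m 0 ++ l) = pvSh m (pvF l) := by
  funext k
  by_cases hk : k < m
  · rw [pvSh, if_pos hk, pvF, List.getD_append _ _ _ _ (by simpa using hk),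
      List.getD_replicate _ (by simpa using hk)]
  · rw [pvSh, if_neg hk, pvF, pvF,
      List.getD_append_right _ _ _ _ (by simpa using Nat.le_of_not_lt hk)]
    simp

theorem pvF_cons_zero (l : List Int) : pvF ((0 : Int) :: l) = pvSh 1 (pvF l) := by
  have := pvF_replicate_append 1 l
  simpa using this

theorem pvF_map_mul (c : Int) (q : List Int) :
    pvF (q.map (fun x => c * x)) = fun k => c * pvF q k := by
  funext k
  by_cases hk : k < q.length
  · simp [pvF, List.getD_eq_getElem, hk]
  · have h1 : q.length ≤ k := by omega
    simp only [pvF]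
    rw [List.getD_eq_default _ _ (by simpa using h1), List.getD_eq_default _ _ h1, mul_zero]

theorem pvB_trimlen_le (p : List Int) : ∀ k, pvB_trimlen p k ≤ k := by
  intro k
  induction k with
  | zero => simp [pvB_trimlen]
  | succ k ih =>
    rw [pvB_trimlen]
    by_cases h : p.getD k 0 == 0
    · rw [if_pos h]; omega
    · rw [if_neg h]

theorem pvB_trimlen_zero (p : List Int) :
    ∀ k j, pvB_trimlen p k ≤ j → j < k → p.getD j 0 = 0 := by
  intro k
  induction k with
  | zero => intro j _ h; omega
  | succ k ih =>
    intro j h1 h2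
    rw [pvB_trimlen] at h1
    by_cases h : p.getD k 0 == 0
    · rw [if_pos h] at h1
      by_cases hj : j = k
      · subst hj; exact eq_of_beq h
      · exact ih j h1 (by omega)
    · rw [if_neg h] at h1
      omega

theorem pvF_trim (p : List Int) : pvF (pvB_trim p) = pvF p := by
  funext j
  have hle := pvB_trimlen_le p p.length
  by_cases hj : j < pvB_trimlen p p.length
  · simp only [pvF, pvB_trim]
    rw [List.getD_eq_getElem _ _ (by simp [List.length_take]; omega),
      List.getD_eq_getElem _ _ (by omega), List.getElem_take]
  · simp only [pvF, pvB_trim]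
    rw [List.getD_eq_default _ _ (by simp [List.length_take]; omega)]
    by_cases hl : j < p.length
    · exact (pvB_trimlen_zero p p.length j (by omega) hl).symm
    · rw [List.getD_eq_default _ _ (by omega)]

-- δ-function: coefficient function of the constant polynomial c
def pvDelta (c : Int) : Nat → Int := fun k => if k = 0 then c else 0

theorem pvF_cons (c : Int) (l : List Int) : pvF (c :: l) = pvDelta c + pvSh 1 (pvF l) := by
  funext k
  cases k with
  | zero => simp [pvF, pvDelta, pvSh]
  | succ k => simp [pvF, pvDelta, pvSh]

theorem pvConv_comm (f g : Nat → Int) : pvConv f g = pvConv g f := by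
  funext k
  rw [pvConv, pvConv, ← Finset.sum_range_reflect]
  refine Finset.sum_congr rfl ?_
  intro i hi
  rw [Finset.mem_range] at hi
  have h1 : k + 1 - 1 - i = k - i := by omega
  have h2 : k - (k - i) = i := by omega
  rw [h1, h2, mul_comm]

theorem pvConv_add_left (f f' g : Nat → Int) :
    pvConv (f + f') g = pvConv f g + pvConv f' g := by
  funext k
  simp [pvConv, add_mul, Finset.sum_add_distrib]

theorem pvConv_add_right (f g g' : Nat → Int) :
    pvConv f (g + g') = pvConv f g + pvConv f g' := by
  rw [pvConv_comm, pvConv_add_left, pvConv_comm g f, pvConv_comm g' f]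

theorem pvConv_zero_left (g : Nat → Int) : pvConv 0 g = 0 := by
  funext k; simp [pvConv]

theorem pvSh_add (m : Nat) (f g : Nat → Int) : pvSh m (f + g) = pvSh m f + pvSh m g := by
  funext k
  by_cases hk : k < m <;> simp [pvSh, hk]

theorem pvSh_sub (m : Nat) (f g : Nat → Int) : pvSh m (f - g) = pvSh m f - pvSh m g := by
  funext k
  by_cases hk : k < m <;> simp [pvSh, hk]

theorem pvSh_sh (m m' : Nat) (f : Nat → Int) : pvSh m (pvSh m' f) = pvSh (m + m') f := by
  funext k
  by_cases h1 : k < m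
  · rw [pvSh, if_pos h1, pvSh, if_pos (by omega)]
  · rw [pvSh, if_neg h1, pvSh, pvSh]
    by_cases h2 : k - m < m'
    · rw [if_pos h2, if_pos (by omega)]
    · rw [if_neg h2, if_neg (by omega)]
      congr 1
      omega

theorem pvConv_sh_left (m : Nat) (f g : Nat → Int) :
    pvConv (pvSh m f) g = pvSh m (pvConv f g) := by
  funext k
  by_cases hk : k < m
  · rw [pvSh, if_pos hk, pvConv]
    refine Finset.sum_eq_zero ?_
    intro i hi
    rw [Finset.mem_range] at hi
    rw [pvSh, if_pos (by omega), zero_mul]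
  · rw [pvSh, if_neg hk, pvConv, pvConv]
    have hsplit : ∑ i ∈ Finset.range (k + 1), pvSh m f i * g (k - i)
        = (∑ i ∈ Finset.Ico 0 m, pvSh m f i * g (k - i))
          + ∑ i ∈ Finset.Ico m (k + 1), pvSh m f i * g (k - i) := by
      rw [Finset.sum_Ico_consecutive _ (Nat.zero_le m) (by omega), Finset.range_eq_Ico]
    rw [hsplit]
    have hz : ∑ i ∈ Finset.Ico 0 m, pvSh m f i * g (k - i) = 0 := by
      refine Finset.sum_eq_zero ?_
      intro i hi
      rw [Finset.mem_Ico] at hi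
      rw [pvSh, if_pos (by omega), zero_mul]
    rw [hz, zero_add, Finset.sum_Ico_eq_sum_range]
    have hn : k + 1 - m = (k - m) + 1 := by omega
    rw [hn]
    refine Finset.sum_congr rfl ?_
    intro i hi
    rw [Finset.mem_range] at hi
    rw [pvSh, if_neg (by omega)]
    congr 2
    · omega
    · omega

theorem pvConv_sh_right (m : Nat) (f g : Nat → Int) :
    pvConv f (pvSh m g) = pvSh m (pvConv f g) := by
  rw [pvConv_comm, pvConv_sh_left, pvConv_comm g f]

theorem pvConv_delta (c : Int) (g : Nat → Int) : pvConv (pvDelta c) g = fun k => c * g k := by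
  funext k
  rw [pvConv, Finset.sum_range_succ']
  have hz : ∑ i ∈ Finset.range k, pvDelta c (i + 1) * g (k - (i + 1)) = 0 := by
    refine Finset.sum_eq_zero ?_
    intro i _
    simp [pvDelta]
  rw [hz, zero_add]
  simp [pvDelta]

theorem pvSchool_eq (p q : List Int) : pvF (pvB_school p q) = pvConv (pvF p) (pvF q) := by
  induction p with
  | nil => rw [pvB_school, pvF_nil, pvConv_zero_left]
  | cons c p' ih =>
    rw [pvB_school, pvF_add, pvF_map_mul, pvF_cons_zero, ih,
      pvF_cons, pvConv_add_left, pvConv_delta, pvConv_sh_left]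

-- split of a coefficient function at index m
theorem pvF_split (p : List Int) (m : Nat) :
    pvF p = pvF (p.take m) + pvSh m (pvF (p.drop m)) := by
  funext k
  have hlt : (p.take m).length = min m p.length := List.length_take
  have hld : (p.drop m).length = p.length - m := List.length_drop
  by_cases hk : k < m
  · have h1 : pvF (p.take m) k = pvF p k := by
      by_cases hl : k < p.length
      · simp only [pvF]
        rw [List.getD_eq_getElem _ _ (by omega), List.getD_eq_getElem _ _ hl,
          List.getElem_take]
      · simp only [pvF]
        rw [List.getD_eq_default _ _ (by omega), List.getD_eq_default _ _ (by omega)]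
    rw [Pi.add_apply, h1, pvSh, if_pos hk, add_zero]
  · have h1 : pvF (p.take m) k = 0 := by
      simp only [pvF]
      rw [List.getD_eq_default _ _ (by omega)]
    have h2 : pvSh m (pvF (p.drop m)) k = pvF p k := by
      rw [pvSh, if_neg hk]
      by_cases hl : k < p.length
      · simp only [pvF]
        rw [List.getD_eq_getElem _ _ (by omega), List.getD_eq_getElem _ _ hl,
          List.getElem_drop]
        congr 1
        omega
      · simp only [pvF]
        rw [List.getD_eq_default _ _ (by omega), List.getD_eq_default _ _ (by omega)]
    rw [Pi.add_apply, h1, h2, zero_add]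

-- the Karatsuba identity at the level of coefficient functions
theorem pvKaraAlg (A0 A1 B0 B1 : Nat → Int) (m : Nat) :
    pvConv A0 B0
      + pvSh m (pvConv (A0 + A1) (B0 + B1) - pvConv A0 B0 - pvConv A1 B1)
      + pvSh (2 * m) (pvConv A1 B1)
    = pvConv (A0 + pvSh m A1) (B0 + pvSh m B1) := by
  simp only [two_mul, pvConv_add_left, pvConv_add_right, pvConv_sh_left,
    pvConv_sh_right, pvSh_sh, pvSh_add, pvSh_sub]
  abel

theorem pvKaraBody (fuel : Nat)
    (ih : ∀ p q : List Int, p.length + q.length < fuel →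
      pvF (pvB_kara fuel p q) = pvConv (pvF p) (pvF q))
    (p q : List Int) (hle : p.length ≤ q.length) (hsum : p.length + q.length ≤ fuel) :
    pvF (if p.length ≤ 32 then pvB_school p q
        else
          pvB_add
            (pvB_add (pvB_kara fuel (p.take (p.length / 2)) (q.take (p.length / 2)))
              (List.replicate (p.length / 2) 0 ++
                pvB_sub
                  (pvB_sub
                    (pvB_kara fuel (pvB_add (p.take (p.length / 2)) (p.drop (p.length / 2)))
                      (pvB_add (q.take (p.length / 2)) (q.drop (p.length / 2))))
                    (pvB_kara fuel (p.take (p.length / 2)) (q.take (p.length / 2))))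
                  (pvB_kara fuel (p.drop (p.length / 2)) (q.drop (p.length / 2)))))
            (List.replicate (2 * (p.length / 2)) 0 ++
              pvB_kara fuel (p.drop (p.length / 2)) (q.drop (p.length / 2))))
      = pvConv (pvF p) (pvF q) := by
  by_cases hbase : p.length ≤ 32
  · rw [if_pos hbase, pvSchool_eq]
  · rw [if_neg hbase]
    have ihlo := ih (p.take (p.length / 2)) (q.take (p.length / 2)) (by
      simp only [List.length_take]; omega)
    have ihhi := ih (p.drop (p.length / 2)) (q.drop (p.length / 2)) (by
      simp only [List.length_drop]; omega)
    have ihmid := ih (pvB_add (p.take (p.length / 2)) (p.drop (p.length / 2)))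
        (pvB_add (q.take (p.length / 2)) (q.drop (p.length / 2))) (by
      simp only [pvB_add_length, List.length_take, List.length_drop]; omega)
    rw [pvF_add, pvF_add, pvF_replicate_append, pvF_replicate_append,
      pvF_sub, pvF_sub, ihlo, ihhi, ihmid, pvF_add, pvF_add]
    rw [pvF_split p (p.length / 2), pvF_split q (p.length / 2)]
    exact pvKaraAlg (pvF (p.take (p.length / 2))) (pvF (p.drop (p.length / 2)))
      (pvF (q.take (p.length / 2))) (pvF (q.drop (p.length / 2))) (p.length / 2)

theorem pvKara_eq : ∀ (fuel : Nat) (p q : List Int), p.length + q.length < fuel →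
    pvF (pvB_kara fuel p q) = pvConv (pvF p) (pvF q) := by
  intro fuel
  induction fuel with
  | zero => intro p q h; exact absurd h (by omega)
  | succ fuel ih =>
    intro p0 q0 hb
    simp only [pvB_kara]
    by_cases hs : q0.length < p0.length
    · simp only [if_pos hs]
      rw [pvConv_comm]
      exact pvKaraBody fuel ih q0 p0 (by omega) (by omega)
    · simp only [if_neg hs]
      exact pvKaraBody fuel ih p0 q0 (by omega) (by omega)

-- the full product of two length-≤N polynomials vanishes from degree N+N'−1 on
theorem pvConv_vanish (p q : List Int) (j : Nat) (hj : p.length + q.length ≤ j + 1) :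
    pvConv (pvF p) (pvF q) j = 0 := by
  rw [pvConv]
  refine Finset.sum_eq_zero ?_
  intro i hi
  rw [Finset.mem_range] at hi
  simp only [pvF]
  by_cases hip : i < p.length
  · have : q.length ≤ j - i := by omega
    rw [List.getD_eq_default _ _ this, mul_zero]
  · rw [List.getD_eq_default _ _ (by omega), zero_mul]

-- ---- the wrap-around fold ----
theorem pvB_fold (r : Int) (hr : 0 < r) :
    ∀ l : List Int,
      ((PySem.List.enumerate l 0).foldl (pvB_cycstep r) (List.replicate r.toNat 0)).length = r.toNat ∧
      ∀ k : Nat, k < r.toNat →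
        PySem.List.pyGetD ((PySem.List.enumerate l 0).foldl (pvB_cycstep r)
            (List.replicate r.toNat 0)) (k : Int) 0 =
          ∑ j ∈ (Finset.range l.length).filter (fun j => j % r.toNat = k), l.getD j 0 := by
  intro l
  induction l using List.reverseRecOn with
  | nil =>
    refine ⟨by simp [PySem.List.enumerate_nil], ?_⟩
    intro k hk
    simp [PySem.List.enumerate_nil, List.getD_replicate _ hk]
  | append_singleton l' c ih =>
    obtain ⟨ihlen, ihval⟩ := ih
    have henum : PySem.List.enumerate (l' ++ [c]) 0
        = PySem.List.enumerate l' 0 ++ [((l'.length : Int), c)] := by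
      rw [PySem.List.enumerate_append]
      simp [PySem.List.enumerate_cons, PySem.List.enumerate_nil]
    rw [henum, List.foldl_append, List.foldl_cons, List.foldl_nil]
    set out := (PySem.List.enumerate l' 0).foldl (pvB_cycstep r) (List.replicate r.toNat 0) with hout
    set L := l'.length with hL
    have hrpos : 0 < r.toNat := by omega
    have hmlt : L % r.toNat < r.toNat := Nat.mod_lt L hrpos
    have hidx : PySem.Int.mod (L : Int) r = ((L % r.toNat : Nat) : Int) := by
      have hdm := Nat.div_add_mod L r.toNat
      have hdvd : r ∣ (L : Int) - ((L % r.toNat : Nat) : Int) := by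
        refine ⟨((L / r.toNat : Nat) : Int), ?_⟩
        have hcast : (L : Int) = ((r.toNat : Nat) : Int) * ((L / r.toNat : Nat) : Int)
            + ((L % r.toNat : Nat) : Int) := by
          exact_mod_cast hdm.symm
        rw [hcast]
        have hrc : ((r.toNat : Nat) : Int) = r := Int.toNat_of_nonneg (le_of_lt hr)
        rw [hrc]
        ring
      calc PySem.Int.mod (L : Int) r
          = PySem.Int.mod ((L % r.toNat : Nat) : Int) r := pvMod_congr (by omega) hdvd
        _ = ((L % r.toNat : Nat) : Int) := pvMod_self_of_range (by positivity) (by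
              push_cast; omega)
    simp only [pvB_cycstep, hidx]
    refine ⟨by rw [PySem.List.length_pySetD]; exact ihlen, ?_⟩
    intro k hk
    rw [PySem.List.pyGetD_pySetD_natCast out (L % r.toNat) k _ 0 (by omega)]
    have hfl : (Finset.range (L + 1)).filter (fun j => j % r.toNat = k)
        = if L % r.toNat = k
          then insert L ((Finset.range L).filter (fun j => j % r.toNat = k))
          else (Finset.range L).filter (fun j => j % r.toNat = k) := by
      rw [Finset.range_add_one, Finset.filter_insert]
    have hcongr : ∑ j ∈ (Finset.range L).filter (fun j => j % r.toNat = k), (l' ++ [c]).getD j 0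
        = ∑ j ∈ (Finset.range L).filter (fun j => j % r.toNat = k), l'.getD j 0 := by
      refine Finset.sum_congr rfl ?_
      intro j hj
      rw [Finset.mem_filter, Finset.mem_range] at hj
      rw [List.getD_append _ _ _ _ hj.1]
    have hlast : (l' ++ [c]).getD L 0 = c := by
      rw [List.getD_append_right _ _ _ _ (le_refl _), Nat.sub_self]
      rfl
    rw [show (l' ++ [c]).length = L + 1 by simp [hL], hfl]
    by_cases hhit : k = L % r.toNat
    · rw [if_pos hhit, if_pos hhit.symm, Finset.sum_insert (by
        simp [Finset.mem_filter]), hlast, hcongr, ← hhit, ihval k hk]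
      ring
    · rw [if_neg hhit, if_neg (fun hx => hhit hx.symm), hcongr, ihval k hk]

-- summing a class of residues: only k and k+r survive
theorem pvClassSum (rN k L : Nat) (h : Nat → Int) (hr : 0 < rN) (hk : k < rN)
    (hL : ∀ j, L ≤ j → h j = 0) (h2 : ∀ j, 2 * rN - 1 ≤ j → h j = 0) :
    ∑ j ∈ (Finset.range L).filter (fun j => j % rN = k), h j = h k + h (k + rN) := by
  have s1 : ∑ j ∈ (Finset.range L).filter (fun j => j % rN = k), h j
      = ∑ j ∈ (Finset.range (max L (2 * rN))).filter (fun j => j % rN = k), h j := by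
    refine Finset.sum_subset ?_ ?_
    · exact Finset.filter_subset_filter _ (Finset.range_subset_range.mpr (le_max_left L (2 * rN)))
    · intro x hx hnx
      rw [Finset.mem_filter, Finset.mem_range] at hx
      rw [Finset.mem_filter, Finset.mem_range] at hnx
      refine hL x ?_
      by_contra hcon
      exact hnx ⟨by omega, hx.2⟩
  have s2 : ∑ j ∈ (Finset.range (2 * rN)).filter (fun j => j % rN = k), h j
      = ∑ j ∈ (Finset.range (max L (2 * rN))).filter (fun j => j % rN = k), h j := by
    refine Finset.sum_subset ?_ ?_
    · exact Finset.filter_subset_filter _ (Finset.range_subset_range.mpr (le_max_right L (2 * rN)))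
    · intro x hx hnx
      rw [Finset.mem_filter, Finset.mem_range] at hx
      rw [Finset.mem_filter, Finset.mem_range] at hnx
      refine h2 x ?_
      by_contra hcon
      exact hnx ⟨by omega, hx.2⟩
  have s3 : (Finset.range (2 * rN)).filter (fun j => j % rN = k) = {k, k + rN} := by
    ext j
    simp only [Finset.mem_filter, Finset.mem_range, Finset.mem_insert, Finset.mem_singleton]
    constructor
    · rintro ⟨hj, hm⟩
      have hdm := Nat.div_add_mod j rN
      have hd : j / rN < 2 := (Nat.div_lt_iff_lt_mul hr).mpr (by omega)
      rw [hm] at hdm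
      generalize hdp : j / rN = d at hd hdm
      have hd01 : d = 0 ∨ d = 1 := by omega
      rcases hd01 with h0 | h1
      · left; subst h0; omega
      · right; subst h1; omega
    · rintro (rfl | rfl)
      · exact ⟨by omega, Nat.mod_eq_of_lt hk⟩
      · exact ⟨by omega, by rw [Nat.add_mod_right]; exact Nat.mod_eq_of_lt hk⟩
  rw [s1, ← s2, s3, Finset.sum_pair (by omega : k ≠ k + rN)]

-- list sum of a mapped pyRange as a Finset sum
theorem pvSumRange (f : Int → Int) :
    ∀ I : Nat, ((PySem.List.pyRange 0 (I : Int) 1).map f).sum = ∑ i ∈ Finset.range I, f (i : Int) := by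
  intro I
  induction I with
  | zero => rw [PySem.List.pyRange_one_eq_nil (by norm_num)]; simp
  | succ I ih =>
    have hsplit : PySem.List.pyRange 0 ((I + 1 : Nat) : Int) 1
        = PySem.List.pyRange 0 (I : Int) 1 ++ [(I : Int)] := by
      push_cast
      exact PySem.List.pyRange_one_succ_right (by positivity)
    rw [hsplit, List.map_append, List.sum_append, ih, Finset.sum_range_succ]
    simp

theorem pvSumRange' (f : Int → Int) (b : Int) (hb : 0 ≤ b) :
    ((PySem.List.pyRange 0 b 1).map f).sum = ∑ i ∈ Finset.range b.toNat, f (i : Int) := by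
  have h := pvSumRange f b.toNat
  rwa [Int.toNat_of_nonneg hb] at h

-- A's coefficient sum equals the two surviving convolution values
theorem pvAsum (p q : List Int) (r : Int) (hr : 0 < r) (k : Nat)
    (hp : p.length = r.toNat) (hq : q.length = r.toNat) (hk : k < r.toNat) :
    ∑ i ∈ Finset.range r.toNat, pvS p q r (i : Int) (k : Int)
      = pvConv (pvF p) (pvF q) k + pvConv (pvF p) (pvF q) (k + r.toNat) := by
  have hrc : ((r.toNat : Nat) : Int) = r := Int.toNat_of_nonneg (le_of_lt hr)
  set rN := r.toNat with hrN
  -- termwise normal form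
  have hterm : ∀ i : Nat, i < rN →
      pvS p q r (i : Int) (k : Int)
        = pvF p i * pvF q (if i ≤ k then k - i else k + rN - i) := by
    intro i hi
    rw [pvS, PySem.List.pyGetD_natCast]
    by_cases hik : i ≤ k
    · have hmod : PySem.Int.mod ((k : Int) - (i : Int)) r = ((k - i : Nat) : Int) := by
        have : (k : Int) - (i : Int) = ((k - i : Nat) : Int) := by push_cast; omega
        rw [this]
        exact pvMod_self_of_range (by positivity) (by push_cast; omega)
      rw [hmod, PySem.List.pyGetD_natCast, if_pos hik]
      rfl
    · have hmod : PySem.Int.mod ((k : Int) - (i : Int)) r = ((k + rN - i : Nat) : Int) := by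
        have hdvd : r ∣ ((k : Int) - (i : Int)) - ((k + rN - i : Nat) : Int) := by
          refine ⟨-1, ?_⟩
          have : ((k + rN - i : Nat) : Int) = (k : Int) + ((rN : Nat) : Int) - (i : Int) := by
            push_cast; omega
          rw [this, hrN, hrc]
          ring
        rw [pvMod_congr (by omega) hdvd]
        exact pvMod_self_of_range (by push_cast; omega) (by push_cast; omega)
      rw [hmod, PySem.List.pyGetD_natCast, if_neg hik]
      rfl
  have hsum : ∑ i ∈ Finset.range rN, pvS p q r (i : Int) (k : Int)
      = ∑ i ∈ Finset.range rN, pvF p i * pvF q (if i ≤ k then k - i else k + rN - i) := by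
    refine Finset.sum_congr rfl ?_
    intro i hi
    rw [Finset.mem_range] at hi
    exact hterm i hi
  rw [hsum]
  -- split at k+1
  have hsplit : ∑ i ∈ Finset.range rN, pvF p i * pvF q (if i ≤ k then k - i else k + rN - i)
      = (∑ i ∈ Finset.Ico 0 (k + 1), pvF p i * pvF q (if i ≤ k then k - i else k + rN - i))
        + ∑ i ∈ Finset.Ico (k + 1) rN, pvF p i * pvF q (if i ≤ k then k - i else k + rN - i) := by
    rw [Finset.sum_Ico_consecutive _ (Nat.zero_le _) (by omega), Finset.range_eq_Ico]
  rw [hsplit]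
  have hpart1 : ∑ i ∈ Finset.Ico 0 (k + 1), pvF p i * pvF q (if i ≤ k then k - i else k + rN - i)
      = pvConv (pvF p) (pvF q) k := by
    rw [pvConv, Finset.range_eq_Ico]
    refine Finset.sum_congr rfl ?_
    intro i hi
    rw [Finset.mem_Ico] at hi
    rw [if_pos (by omega)]
  have hpart2 : ∑ i ∈ Finset.Ico (k + 1) rN, pvF p i * pvF q (if i ≤ k then k - i else k + rN - i)
      = pvConv (pvF p) (pvF q) (k + rN) := by
    have hsub : Finset.Ico (k + 1) rN ⊆ Finset.range (k + rN + 1) := by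
      intro x hx
      rw [Finset.mem_Ico] at hx
      rw [Finset.mem_range]
      omega
    have hzero : ∀ x ∈ Finset.range (k + rN + 1), x ∉ Finset.Ico (k + 1) rN →
        pvF p x * pvF q (k + rN - x) = 0 := by
      intro x hx hnx
      rw [Finset.mem_range] at hx
      rw [Finset.mem_Ico] at hnx
      simp only [pvF]
      by_cases hxk : x ≤ k
      · have hql : q.length ≤ k + rN - x := by omega
        rw [List.getD_eq_default _ _ hql, mul_zero]
      · have hpl : p.length ≤ x := by omega
        rw [List.getD_eq_default _ _ hpl, zero_mul]
    rw [pvConv, ← Finset.sum_subset hsub hzero]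
    refine Finset.sum_congr rfl ?_
    intro i hi
    rw [Finset.mem_Ico] at hi
    rw [if_neg (by omega)]
  rw [hpart1, hpart2]

-- the two multiplications agree on length-r inputs
theorem pv_mul_eq (p q : List Int) (r n : Int) (hr : 0 < r) (hn : n ≠ 0)
    (hp : p.length = r.toNat) (hq : q.length = r.toNat) :
    pvA_mul p q r n = pvB_cyc p q r n := by
  have hrc : ((r.toNat : Nat) : Int) = r := Int.toNat_of_nonneg (le_of_lt hr)
  obtain ⟨halen, haval⟩ := by
    have h := pv_outer_fold p q r n hr hn r.toNat
    rw [hrc] at h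
    exact h
  obtain ⟨hblen, hbval⟩ := pvB_fold r hr
    (pvB_kara ((pvB_trim p).length + (pvB_trim q).length + 1) (pvB_trim p) (pvB_trim q))
  have hFull : ∀ j : Nat,
      (pvB_kara ((pvB_trim p).length + (pvB_trim q).length + 1) (pvB_trim p) (pvB_trim q)).getD j 0
      = pvConv (pvF p) (pvF q) j := by
    intro j
    have h := congrFun (pvKara_eq ((pvB_trim p).length + (pvB_trim q).length + 1)
      (pvB_trim p) (pvB_trim q) (by omega)) j
    rwa [pvF_trim, pvF_trim] at h
  unfold pvA_mul pvB_cyc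
  apply List.ext_getElem
  · rw [halen, List.length_map, hblen]
  intro k h1 h2
  have hk : k < r.toNat := by rw [halen] at h1; exact h1
  have hk2 : k < ((PySem.List.enumerate
      (pvB_kara ((pvB_trim p).length + (pvB_trim q).length + 1) (pvB_trim p) (pvB_trim q)) 0).foldl
      (pvB_cycstep r) (List.replicate r.toNat 0)).length := by rw [hblen]; exact hk
  rw [← PySem.List.pyGetD_ofNat _ k 0 h1, haval k hk, List.getElem_map,
    ← PySem.List.pyGetD_ofNat _ k 0 hk2, hbval k hk]
  -- both are mod n of the same integer
  congr 1
  rw [pvSumRange' (fun i => pvS p q r i (k : Int)) r (le_of_lt hr),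
    pvAsum p q r hr k hp hq hk]
  have hsum : ∑ j ∈ (Finset.range (pvB_kara ((pvB_trim p).length + (pvB_trim q).length + 1)
          (pvB_trim p) (pvB_trim q)).length).filter
        (fun j => j % r.toNat = k),
        (pvB_kara ((pvB_trim p).length + (pvB_trim q).length + 1) (pvB_trim p) (pvB_trim q)).getD j 0
      = ∑ j ∈ (Finset.range (pvB_kara ((pvB_trim p).length + (pvB_trim q).length + 1)
          (pvB_trim p) (pvB_trim q)).length).filter
        (fun j => j % r.toNat = k), pvConv (pvF p) (pvF q) j := by
    exact Finset.sum_congr rfl (fun j _ => hFull j)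
  rw [hsum, pvClassSum r.toNat k
    (pvB_kara ((pvB_trim p).length + (pvB_trim q).length + 1) (pvB_trim p) (pvB_trim q)).length
    (pvConv (pvF p) (pvF q)) (by omega) hk ?_ ?_]
  · intro j hj
    rw [← hFull j, List.getD_eq_default _ _ hj]
  · intro j hj
    exact pvConv_vanish p q j (by omega)

theorem pvB_cyc_len (p q : List Int) (r n : Int) (hr : 0 < r) :
    (pvB_cyc p q r n).length = r.toNat := by
  rw [pvB_cyc, List.length_map]
  exact (pvB_fold r hr
    (pvB_kara ((pvB_trim p).length + (pvB_trim q).length + 1) (pvB_trim p) (pvB_trim q))).1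

theorem pv_loop_eq (r n : Int) (hr : 0 < r) (hn : n ≠ 0) :
    ∀ (fuel : Nat) (e : Int) (poly base : List Int),
      poly.length = r.toNat → base.length = r.toNat →
      pvA_loop fuel e poly base r n = pvB_loop fuel e poly base r n := by
  intro fuel
  induction fuel with
  | zero => intro e poly base _ _; rfl
  | succ fuel ih =>
    intro e poly base hpoly hbase
    simp only [pvA_loop, pvB_loop]
    by_cases hpos : 0 < e
    · rw [if_pos hpos, if_pos hpos]
      have hpoly' : (if PySem.Int.band e 1 ≠ 0 then pvA_mul poly base r n else poly)
          = (if PySem.Int.band e 1 ≠ 0 then pvB_cyc poly base r n else poly) := by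
        by_cases hb : PySem.Int.band e 1 ≠ 0
        · rw [if_pos hb, if_pos hb, pv_mul_eq poly base r n hr hn hpoly hbase]
        · rw [if_neg hb, if_neg hb]
      have hpolyB : (if PySem.Int.band e 1 ≠ 0 then pvB_cyc poly base r n else poly).length
          = r.toNat := by
        by_cases hb : PySem.Int.band e 1 ≠ 0
        · rw [if_pos hb]; exact pvB_cyc_len poly base r n hr
        · rw [if_neg hb]; exact hpoly
      rw [hpoly', pv_mul_eq base base r n hr hn hbase hbase]
      exact ih (e >>> (1 : Nat)) _ _ hpolyB (pvB_cyc_len base base r n hr)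
    · rw [if_neg hpos, if_neg hpos]

theorem pv_poly0_eq (r : Int) (hr : 2 ≤ r) :
    PySem.List.pySetD (List.replicate r.toNat 0) 0 (1 : Int)
      = 1 :: List.replicate (r - 1).toNat 0 := by
  rw [PySem.List.pySetD_of_nonneg _ _ le_rfl]
  have h2 : r.toNat = (r - 1).toNat + 1 := by omega
  rw [h2, List.replicate_succ]
  simp

theorem pv_base0_eq (r a : Int) (hr : 2 ≤ r) :
    PySem.List.pySetD (PySem.List.pySetD (List.replicate r.toNat 0) 0 a) 1 (1 : Int)
      = a :: 1 :: List.replicate (r - 2).toNat 0 := by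
  rw [PySem.List.pySetD_of_nonneg _ _ le_rfl, PySem.List.pySetD_of_nonneg _ _ (by omega : (0:Int) ≤ 1)]
  have h2 : r.toNat = (r - 2).toNat + 1 + 1 := by omega
  rw [h2, List.replicate_succ, List.replicate_succ]
  simp

theorem pv_expected_eq (n a r : Int) (hr : 2 ≤ r) (hn : n ≠ 0) :
    (PySem.List.pySetD (PySem.List.pySetD (List.replicate r.toNat 0) 0 (PySem.Int.mod a n))
        (PySem.Int.mod n r)
        (PySem.Int.mod (PySem.List.pyGetD
            (PySem.List.pySetD (List.replicate r.toNat 0) 0 (PySem.Int.mod a n))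
            (PySem.Int.mod n r) 0 + 1) n))
      = (PySem.List.pyRange 0 r 1).map (fun k =>
          PySem.Int.mod ((if k = 0 then a else 0) + (if k = PySem.Int.mod n r then 1 else 0)) n) := by
  have hrpos : (0:Int) < r := by omega
  have ht0 : 0 ≤ PySem.Int.mod n r := PySem.Int.mod_nonneg n hrpos
  have ht1 : PySem.Int.mod n r < r := PySem.Int.mod_lt n hrpos
  set t := PySem.Int.mod n r with htdef
  have htcast : t = ((t.toNat : Nat) : Int) := by omega
  have hlen0 : (PySem.List.pySetD (List.replicate r.toNat 0) (0:Int) (PySem.Int.mod a n)).length = r.toNat := by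
    rw [PySem.List.length_pySetD, List.length_replicate]
  apply List.ext_getElem
  · rw [PySem.List.length_pySetD, hlen0, List.length_map, PySem.List.length_pyRange_one]
    omega
  intro k h1 h2
  have hk : k < r.toNat := by
    simpa [PySem.List.length_pySetD, hlen0] using h1
  have hrcast : r = ((r.toNat : Nat) : Int) := by omega
  have hrhs : ((PySem.List.pyRange 0 r 1).map (fun k =>
      PySem.Int.mod ((if k = 0 then a else 0) + (if k = t then 1 else 0)) n))[k]'h2
      = PySem.Int.mod ((if (k:Int) = 0 then a else 0) + (if (k:Int) = t then 1 else 0)) n := by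
    rw [← PySem.List.pyGetD_ofNat _ k 0 h2]
    rw [hrcast, PySem.List.pyGetD_map_pyRange _ r.toNat k 0 hk]
  rw [hrhs]
  rw [← PySem.List.pyGetD_ofNat _ k 0 h1]
  rw [htcast, PySem.List.pyGetD_pySetD_natCast _ _ _ _ _ (by omega)]
  rw [show ((0:Int)) = (((0:Nat)):Int) by norm_num]
  rw [PySem.List.pyGetD_pySetD_natCast _ _ _ _ _ (by simp; omega)]
  rw [PySem.List.pyGetD_pySetD_natCast _ _ _ _ _ (by simp; omega)]
  have htk : t.toNat < r.toNat := by omega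
  simp only [PySem.List.pyGetD_natCast, Nat.cast_zero]
  rw [List.getD_replicate _ htk, List.getD_replicate _ hk]
  have hc0 : ((k:Nat):Int) = 0 ↔ k = 0 := by omega
  have hct : ((k:Nat):Int) = ((t.toNat:Nat):Int) ↔ k = t.toNat := by omega
  by_cases hkt : k = t.toNat <;> by_cases hk0 : k = 0
  · rw [if_pos hkt, if_pos (by omega : t.toNat = 0), if_pos (hc0.mpr hk0), if_pos (hct.mpr hkt)]
    exact pvMod_mod_add hn a 1
  · rw [if_pos hkt, if_neg (by omega : ¬ t.toNat = 0), if_neg (by rw [hc0]; exact hk0), if_pos (hct.mpr hkt)]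
  · rw [if_neg hkt, if_pos hk0, if_pos (hc0.mpr hk0), if_neg (by rw [hct]; exact hkt), add_zero]
  · rw [if_neg hkt, if_neg hk0, if_neg (by rw [hc0]; exact hk0), if_neg (by rw [hct]; exact hkt), add_zero]
    exact (pvMod_zero hn).symm

-- ===== VERDICT (by name: the statement is the Claim_ definition above) =====
theorem polynomial_test_spec : Claim_equal_polynomial_test := by
  intro n a r _ hpre
  obtain ⟨hr, hn⟩ := hpre
  have hr0 : (0:Int) < r := by omega
  simp only [Spec_polynomial_test, polynomial_test, polynomial_test_alt]
  rw [pv_poly0_eq r hr, pv_base0_eq r a hr, pv_expected_eq n a r hr hn,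
    pv_loop_eq r n hr0 hn n.toNat n (1 :: List.replicate (r - 1).toNat 0)
      (a :: 1 :: List.replicate (r - 2).toNat 0) (by simp; omega) (by simp; omega)]
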